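-- pv_equiv track=rewrite | github.com/derek-perdomo/ggsolver | ggsolver/logic/scltl.py | scltl_always
-- ===== SOURCE A (Python) =====
-- def scltl_always(args):
--     """Parse ScLTL Always."""
--     if len(args) == 1:
--         return str(args[0])
--     else:
--         f = str(args[-1])
--         for _ in args[:-1]:
--             f = f"G({f})"
--         return f
-- ===== SOURCE B (Python) =====
-- def scltl_always(args):
--     """Parse ScLTL Always."""
--     n = len(args)
--     return "G(" * (n - 1) + str(args[-1]) + ")" * (n - 1)
-- ===== Notes on version B (the rewrite author's own statement) =====
-- stated objective: faster
-- what changed: Replaces the accumulator loop over args[:-1] (repeated string concatenation, quadratic in output size) by a closed-form construction: 'G('*(n-1) + str(args[-1]) + ')'*(n-1), which also subsumes the len==1 branch.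
import Mathlib
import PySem

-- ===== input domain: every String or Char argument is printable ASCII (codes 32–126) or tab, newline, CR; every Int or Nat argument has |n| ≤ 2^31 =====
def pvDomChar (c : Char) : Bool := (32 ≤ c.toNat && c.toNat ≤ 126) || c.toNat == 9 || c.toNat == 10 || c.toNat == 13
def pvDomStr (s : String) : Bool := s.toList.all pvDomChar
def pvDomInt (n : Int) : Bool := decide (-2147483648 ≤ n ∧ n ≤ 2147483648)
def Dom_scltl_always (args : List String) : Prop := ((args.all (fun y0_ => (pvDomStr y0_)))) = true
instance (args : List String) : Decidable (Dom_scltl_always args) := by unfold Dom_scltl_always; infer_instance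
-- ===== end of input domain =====

-- B: closed-form construction ("G("*(n-1) + last + ")"*(n-1)) instead of A's accumulator loop; same value on all non-empty args.
-- ===== PORT A =====
def scltl_always (args : List String) : String :=
  if args.length == 1 then PySem.List.pyGetD args 0 ""
  else
    let f := PySem.List.pyGetD args (-1) ""
    (PySem.List.slice args none (some (-1))).foldl (fun f _ => "G(" ++ f ++ ")") f

-- ===== PORT B =====
-- pvRepeat s k = Python's s * k (for k ≥ 0)
def pvRepeat (s : String) : Nat → String
  | 0 => ""
  | n + 1 => s ++ pvRepeat s n

def scltl_always_alt (args : List String) : String :=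
  let n := args.length
  pvRepeat "G(" (n - 1) ++ PySem.List.pyGetD args (-1) "" ++ pvRepeat ")" (n - 1)

-- ===== PRECONDITION & SPEC =====
-- Pre_ excludes only the empty list, on which Python A raises IndexError (args[-1]); B raises there too.
def Pre_scltl_always (args : List String) : Prop := args ≠ []
instance (args : List String) : Decidable (Pre_scltl_always args) := by unfold Pre_scltl_always; infer_instance
def pvWitness_scltl_always : List String := ["p", "q"]
def Spec_scltl_always (args : List String) (out : String) : Prop := out = scltl_always_alt args
instance (args : List String) (out : String) : Decidable (Spec_scltl_always args out) := by unfold Spec_scltl_always; infer_instance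

-- ===== CLAIM (what is proved, stated in full; the proofs are below) =====
def Claim_equal_scltl_always : Prop := ∀ (args : List String), Dom_scltl_always args → Pre_scltl_always args → Spec_scltl_always args (scltl_always args)

-- ===== LEMMAS AND PROOFS =====
theorem pvRepeat_comm (s : String) (n : Nat) : s ++ pvRepeat s n = pvRepeat s n ++ s := by
  induction n with
  | zero => simp [pvRepeat]
  | succ n ih =>
      show s ++ (s ++ pvRepeat s n) = (s ++ pvRepeat s n) ++ s
      rw [String.append_assoc]
      exact congrArg (s ++ ·) ih

theorem pvRepeat_succ_right (s : String) (n : Nat) :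
    pvRepeat s (n + 1) = pvRepeat s n ++ s := by
  rw [show pvRepeat s (n + 1) = s ++ pvRepeat s n from rfl, pvRepeat_comm]

theorem pvRepeat_swap (s t : String) (n : Nat) :
    pvRepeat s n ++ (s ++ t) = s ++ (pvRepeat s n ++ t) := by
  rw [← String.append_assoc, ← pvRepeat_succ_right,
    show pvRepeat s (n + 1) = s ++ pvRepeat s n from rfl, String.append_assoc]

theorem scltl_fold_closed (l : List String) (s : String) :
    l.foldl (fun f _ => "G(" ++ f ++ ")") s
      = pvRepeat "G(" l.length ++ s ++ pvRepeat ")" l.length := by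
  induction l generalizing s with
  | nil => simp [pvRepeat]
  | cons a l ih =>
      rw [List.foldl_cons, ih, List.length_cons,
        show pvRepeat "G(" (l.length + 1) = "G(" ++ pvRepeat "G(" l.length from rfl,
        pvRepeat_succ_right ")"]
      simp [String.append_assoc, pvRepeat_swap, ← pvRepeat_comm]

-- ===== VERDICT (by name: the statement is the Claim_ definition above) =====
theorem scltl_always_spec : Claim_equal_scltl_always := by
  intro args _ hpre
  unfold Spec_scltl_always scltl_always scltl_always_alt
  by_cases h1 : args.length = 1
  · obtain ⟨x, hx⟩ : ∃ x, args = [x] := by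
      cases args with
      | nil => simp at h1
      | cons a t => cases t with
        | nil => exact ⟨a, rfl⟩
        | cons b u => simp at h1
    subst hx
    simp [PySem.List.pyGetD, PySem.List.pyGet?_neg_one, pvRepeat]
  · simp only [beq_iff_eq, if_neg h1]
    rw [scltl_fold_closed]
    have h : (PySem.List.slice args none (some (-1))).length = args.length - 1 := by
      rw [PySem.List.slice_to_neg_one]; simp
    rw [h]
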